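-- pv_equiv track=rewrite | github.com/zogeek/Enigma | first-year/python/09-10-2023/jeu_de_la_vie - Copie.py | creeMap
-- ===== SOURCE A (Python) =====
-- def creeMap(axe_x,axe_y):
--     Map = []
--     r = 0
--     for i in range(axe_y):
--         Map.append([])
--         for u in range(axe_x):
--             Map[i].append(r)
--             r += 1
--     return Map
-- ===== SOURCE B (Python) =====
-- def creeMap(axe_x, axe_y):
--     # Staged: materialize the whole number sequence once (one cell per emitted row slot),
--     # then cut it into rows by slicing at a moving offset.
--     flat = list(range(axe_x * max(axe_y, 0)))
--     rows = []
--     pos = 0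
--     for _ in range(axe_y):
--         rows.append(flat[pos:pos + axe_x])
--         pos += axe_x
--     return rows
-- ===== Notes on version B (the rewrite author's own statement) =====
-- stated objective: alternative
-- what changed: Replaces A's interleaved counter-threading (one append per cell inside nested loops) by two staged passes: first materialize the whole flat sequence range(axe_x*axe_y), then peel it into rows by repeated slicing (take/drop), consuming the buffer.
import Mathlib
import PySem

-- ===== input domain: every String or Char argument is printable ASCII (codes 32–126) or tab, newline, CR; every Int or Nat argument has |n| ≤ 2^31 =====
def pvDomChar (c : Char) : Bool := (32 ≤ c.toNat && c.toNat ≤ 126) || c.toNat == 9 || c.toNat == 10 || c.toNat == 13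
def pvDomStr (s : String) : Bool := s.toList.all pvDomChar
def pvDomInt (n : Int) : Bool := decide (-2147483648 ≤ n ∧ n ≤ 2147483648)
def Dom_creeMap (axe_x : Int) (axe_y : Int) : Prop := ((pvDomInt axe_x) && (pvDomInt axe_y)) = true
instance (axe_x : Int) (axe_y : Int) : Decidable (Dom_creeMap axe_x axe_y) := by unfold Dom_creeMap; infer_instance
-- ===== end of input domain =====

-- B stages the work: it materializes the flat sequence range(axe_x*axe_y) once, then peels it
-- into rows by repeated slicing, instead of A's per-cell counter threading (objective: alternative).

-- ===== PORT A =====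
-- Literal port of A: outer loop appends an empty row, inner loop appends the
-- running counter r to Map[i] (modelled as getD/set at index i.toNat, exact since i ≥ 0).
def creeMap (axe_x : Int) (axe_y : Int) : List (List Int) :=
  ((PySem.List.pyRange 0 axe_y 1).foldl
    (fun (st : List (List Int) × Int) i =>
      (PySem.List.pyRange 0 axe_x 1).foldl
        (fun (st2 : List (List Int) × Int) _u =>
          (st2.1.set i.toNat ((st2.1.getD i.toNat []) ++ [st2.2]), st2.2 + 1))
        (st.1 ++ [[]], st.2))
    ([], 0)).1

-- ===== PORT B =====
-- Literal port of B: flat = list(range(axe_x*max(axe_y,0))); each iteration cuts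
-- flat[pos:pos+axe_x] and advances pos by axe_x.
def creeMap_alt (axe_x : Int) (axe_y : Int) : List (List Int) :=
  let flat := PySem.List.pyRange 0 (axe_x * max axe_y 0) 1
  ((PySem.List.pyRange 0 axe_y 1).foldl
    (fun (st : List (List Int) × Int) _ =>
      (st.1 ++ [PySem.List.slice flat (some st.2) (some (st.2 + axe_x))], st.2 + axe_x))
    ([], 0)).1

-- ===== PRECONDITION & SPEC =====
def Spec_creeMap (axe_x : Int) (axe_y : Int) (out : List (List Int)) : Prop := out = creeMap_alt axe_x axe_y
instance (axe_x : Int) (axe_y : Int) (out : List (List Int)) : Decidable (Spec_creeMap axe_x axe_y out) := by unfold Spec_creeMap; infer_instance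

-- ===== CLAIM (what is proved, stated in full; the proofs are below) =====
def Claim_equal_creeMap : Prop := ∀ (axe_x : Int) (axe_y : Int), Dom_creeMap axe_x axe_y → Spec_creeMap axe_x axe_y (creeMap axe_x axe_y)

-- ===== LEMMAS AND PROOFS =====

-- The inner loop of A, run over any index list l, appends l.length consecutive counter
-- values to the row at index pre.length and advances r by l.length.
theorem creeMap_inner (l : List Int) (pre : List (List Int)) (row : List Int) (r : Int) :
    l.foldl
      (fun (st2 : List (List Int) × Int) _u =>
        (st2.1.set pre.length ((st2.1.getD pre.length []) ++ [st2.2]), st2.2 + 1))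
      (pre ++ [row], r)
    = (pre ++ [row ++ PySem.List.pyRange r (r + l.length) 1], r + l.length) := by
  induction l generalizing row r with
  | nil => simp [PySem.List.pyRange_one_eq_nil]
  | cons a t ih =>
    simp only [List.foldl_cons]
    rw [List.getD_eq_getElem?_getD,
        show (pre ++ [row])[pre.length]? = some row by simp,
        show ((some row).getD ([] : List Int)) = row from rfl,
        show (pre ++ [row]).set pre.length (row ++ [r]) = pre ++ [row ++ [r]] by
          rw [List.set_append_right _ _ (le_refl _)]; simp,
        ih]
    have h1 : (r + (↑(a :: t).length) : Int) = (r + 1) + (t.length : Int) := by simp; ring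
    rw [h1, PySem.List.pyRange_one_append r (r + 1) ((r + 1) + (t.length : Int)) (by omega) (by omega),
        PySem.List.pyRange_one_singleton]
    simp

-- A's row i (a block of (axe_x-0).toNat consecutive counter values starting at i*len)
-- coincides with the normal-form row range(i*axe_x, (i+1)*axe_x), for any i.
theorem creeMap_row (axe_x i : Int) :
    PySem.List.pyRange (i * ((axe_x - 0).toNat : Int))
      (i * ((axe_x - 0).toNat : Int) + ((axe_x - 0).toNat : Int)) 1
    = PySem.List.pyRange (i * axe_x) ((i + 1) * axe_x) 1 := by
  rcases le_or_gt axe_x 0 with h | h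
  · have hm : ((axe_x - 0).toNat : Int) = 0 := by omega
    have hr : (i + 1) * axe_x = i * axe_x + axe_x := by ring
    rw [hm, PySem.List.pyRange_one_eq_nil (by omega),
        PySem.List.pyRange_one_eq_nil (by omega)]
  · have hm : ((axe_x - 0).toNat : Int) = axe_x := by omega
    rw [hm]
    congr 1
    ring

-- A's outer loop over range(0, n) produces exactly the normal-form rows together with r = n * max(axe_x,0).
theorem creeMap_outer (axe_x : Int) (n : Nat) :
    (PySem.List.pyRange 0 (n : Int) 1).foldl
      (fun (st : List (List Int) × Int) i =>
        (PySem.List.pyRange 0 axe_x 1).foldl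
          (fun (st2 : List (List Int) × Int) _u =>
            (st2.1.set i.toNat ((st2.1.getD i.toNat []) ++ [st2.2]), st2.2 + 1))
          (st.1 ++ [[]], st.2))
      ([], 0)
    = ((PySem.List.pyRange 0 (n : Int) 1).map
        (fun i => PySem.List.pyRange (i * axe_x) ((i + 1) * axe_x) 1),
       (n : Int) * ((axe_x - 0).toNat : Int)) := by
  induction n with
  | zero => simp [PySem.List.pyRange_one_eq_nil]
  | succ k ih =>
    have hsr : PySem.List.pyRange 0 ((k : Int) + 1) 1
        = PySem.List.pyRange 0 (k : Int) 1 ++ [(k : Int)] := by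
      exact PySem.List.pyRange_one_succ_right (by positivity)
    push_cast
    rw [hsr, List.foldl_append, List.map_append, ih]
    simp only [List.foldl_cons, List.foldl_nil]
    have hmaplen : ((PySem.List.pyRange 0 (k : Int) 1).map
        (fun i => PySem.List.pyRange (i * axe_x) ((i + 1) * axe_x) 1)).length = k := by
      simp [PySem.List.length_pyRange_one]
    have hk : ((k : Int)).toNat = ((PySem.List.pyRange 0 (k : Int) 1).map
        (fun i => PySem.List.pyRange (i * axe_x) ((i + 1) * axe_x) 1)).length := by
      simp [hmaplen]
    rw [hk, creeMap_inner]
    have hlen : ((PySem.List.pyRange 0 axe_x 1).length : Int) = ((axe_x - 0).toNat : Int) := by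
      simp [PySem.List.length_pyRange_one]
    refine Prod.ext ?_ ?_
    · simp only [hlen, List.nil_append, List.map_cons, List.map_nil]
      congr 1
      rw [creeMap_row axe_x (k : Int)]
    · simp only [hlen]; ring

-- Python slicing of the empty list yields the empty list.
theorem slice_nil (a? b? : Option Int) : PySem.List.slice ([] : List Int) a? b? = [] := by
  simp [PySem.List.slice]

-- A slice of range(0, M) at in-range bounds is the corresponding sub-range.
theorem slice_pyRange (a b M : Int) (h0 : 0 ≤ a) (hab : a ≤ b) (hbM : b ≤ M) :
    PySem.List.slice (PySem.List.pyRange 0 M 1) (some a) (some b)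
    = PySem.List.pyRange a b 1 := by
  have hu : (PySem.List.pyRange 0 a 1).length = a.toNat := by
    rw [PySem.List.length_pyRange_one]; congr 1; omega
  have hv : (PySem.List.pyRange a b 1).length = b.toNat - a.toNat := by
    rw [PySem.List.length_pyRange_one]; omega
  rw [PySem.List.pyRange_one_append 0 a M h0 (le_trans hab hbM),
      PySem.List.pyRange_one_append a b M hab hbM,
      PySem.List.slice_toNat _ h0 (by omega : (0:Int) ≤ b),
      List.drop_left' hu, List.take_left' hv]

-- B's cut loop over an empty buffer produces one empty row per iteration.
theorem creeMap_alt_nilpeel (axe_x : Int) (l : List Int) (acc : List (List Int)) (p : Int) :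
    (l.foldl
      (fun (st : List (List Int) × Int) _ =>
        (st.1 ++ [PySem.List.slice ([] : List Int) (some st.2) (some (st.2 + axe_x))],
         st.2 + axe_x))
      (acc, p)).1
    = acc ++ l.map (fun _ => ([] : List Int)) := by
  induction l generalizing acc p with
  | nil => simp
  | cons a t ih =>
    simp only [List.foldl_cons]
    rw [show PySem.List.slice ([] : List Int) (some p) (some (p + axe_x)) = [] from
          slice_nil _ _,
        ih]
    simp

-- B's cut loop on the buffer range(0, M) (axe_x > 0, 0 ≤ pos, enough buffer left)
-- yields rows j = range(pos + j*axe_x, pos + (j+1)*axe_x).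
theorem creeMap_alt_peel (axe_x : Int) (hx : 0 < axe_x) (M : Int) (l : List Int) (p : Int)
    (hp : 0 ≤ p) (hM : p + (l.length : Int) * axe_x ≤ M) (acc : List (List Int)) :
    (l.foldl
      (fun (st : List (List Int) × Int) _ =>
        (st.1 ++ [PySem.List.slice (PySem.List.pyRange 0 M 1) (some st.2) (some (st.2 + axe_x))],
         st.2 + axe_x))
      (acc, p)).1
    = acc ++ (List.range l.length).map
        (fun (j : Nat) => PySem.List.pyRange (p + (j : Int) * axe_x) (p + ((j : Int) + 1) * axe_x) 1) := by
  induction l generalizing p acc with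
  | nil => simp
  | cons a t ih =>
    simp only [List.foldl_cons, List.length_cons]
    have htl : (0 : Int) ≤ (t.length : Int) * axe_x := by positivity
    have h2 : p + (((t.length : Int)) + 1) * axe_x ≤ M := by
      have := hM
      simp only [List.length_cons] at this
      push_cast at this
      exact this
    have hM1 : p + (t.length : Int) * axe_x + axe_x ≤ M := by nlinarith
    rw [slice_pyRange p (p + axe_x) M hp (by linarith) (by linarith),
        ih (p + axe_x) (by linarith) (by linarith)]
    rw [List.range_succ_eq_map, List.map_cons, List.map_map]
    simp only [Nat.cast_zero, zero_mul, add_zero, zero_add, one_mul, List.append_assoc,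
      List.singleton_append]
    congr 1
    congr 1
    apply List.map_congr_left
    intro j _
    simp only [Function.comp]
    congr 1 <;> push_cast <;> ring

-- A equals the common normal form: row i of the grid is range(i*axe_x, (i+1)*axe_x).
theorem creeMap_eq_normal (axe_x axe_y : Int) :
    creeMap axe_x axe_y
    = (PySem.List.pyRange 0 axe_y 1).map
        (fun i => PySem.List.pyRange (i * axe_x) ((i + 1) * axe_x) 1) := by
  unfold creeMap
  have h : PySem.List.pyRange 0 axe_y 1 = PySem.List.pyRange 0 ((axe_y.toNat : Int)) 1 := by
    rcases le_or_gt axe_y 0 with h | h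
    · rw [PySem.List.pyRange_one_eq_nil (by omega), PySem.List.pyRange_one_eq_nil (by omega)]
    · congr 1; omega
  rw [h, creeMap_outer]

-- B equals the same normal form.
theorem creeMap_alt_eq_normal (axe_x axe_y : Int) :
    creeMap_alt axe_x axe_y
    = (PySem.List.pyRange 0 axe_y 1).map
        (fun i => PySem.List.pyRange (i * axe_x) ((i + 1) * axe_x) 1) := by
  unfold creeMap_alt
  simp only []
  rcases le_or_gt axe_y 0 with hy | hy
  · rw [PySem.List.pyRange_one_eq_nil (by omega : axe_y ≤ 0)]
    simp
  · rcases le_or_gt axe_x 0 with hx | hx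
    · have hprod : axe_x * max axe_y 0 ≤ 0 := by
        have : max axe_y 0 = axe_y := by omega
        rw [this]; nlinarith
      rw [show PySem.List.pyRange 0 (axe_x * max axe_y 0) 1 = [] from
            PySem.List.pyRange_one_eq_nil (by omega),
          creeMap_alt_nilpeel]
      rw [List.map_congr_left (l := PySem.List.pyRange 0 axe_y 1)
            (f := fun i => PySem.List.pyRange (i * axe_x) ((i + 1) * axe_x) 1)
            (g := fun _ => ([] : List Int))
            (fun i _ => PySem.List.pyRange_one_eq_nil (by nlinarith))]
      simp
    · have h : PySem.List.pyRange 0 axe_y 1 = PySem.List.pyRange 0 ((axe_y.toNat : Int)) 1 := by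
        congr 1; omega
      have hlen2 : (PySem.List.pyRange 0 ((axe_y.toNat : Int)) 1).length = axe_y.toNat := by
        rw [PySem.List.length_pyRange_one]; omega
      have hM : (0 : Int) + ((PySem.List.pyRange 0 ((axe_y.toNat : Int)) 1).length : Int) * axe_x
          ≤ axe_x * max axe_y 0 := by
        rw [hlen2]
        have h1 : max axe_y 0 = axe_y := by omega
        have h2 : ((axe_y.toNat : Int)) = axe_y := by omega
        rw [h1, h2]; nlinarith
      rw [h, creeMap_alt_peel axe_x hx (axe_x * max axe_y 0) _ 0 le_rfl hM, List.nil_append]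
      rw [hlen2, PySem.List.pyRange_one (a := 0) (b := (axe_y.toNat : Int))]
      have hcnt : (((axe_y.toNat : Int)) - 0).toNat = axe_y.toNat := by omega
      rw [hcnt, List.map_map]
      apply List.map_congr_left
      intro j _
      simp only [Function.comp]
      congr 1 <;> ring

-- ===== VERDICT (by name: the statement is the Claim_ definition above) =====
theorem creeMap_spec : Claim_equal_creeMap := by
  intro axe_x axe_y _
  unfold Spec_creeMap
  rw [creeMap_eq_normal, creeMap_alt_eq_normal]
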